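-- pv_equiv track=rewrite | github.com/NateSoul94/MultiTool | multitool/widgets/qr.py | _is_in_finder_area
-- ===== SOURCE A (Python) =====
-- def _is_in_finder_area(row: int, col: int, border: int, matrix_size: int) -> bool:
--     finder_size = 7
--     finder_origins = [
--         (border, border),
--         (matrix_size - border - finder_size, border),
--         (border, matrix_size - border - finder_size),
--     ]
--     for origin_col, origin_row in finder_origins:
--         if origin_row <= row < origin_row + finder_size and origin_col <= col < origin_col + finder_size:
--             return True
--     return False
-- ===== SOURCE B (Python) =====
-- def _is_in_finder_area(row: int, col: int, border: int, matrix_size: int) -> bool: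
--     # Classify each axis into a band code: 0 = near (top/left) band, 1 = far
--     # (bottom/right) band (only if not near), 2 = neither.  A cell lies in a
--     # finder pattern exactly when the two codes sum to at most 1, which keeps
--     # the top-left, top-right and bottom-left corners and drops bottom-right.
--     def band_code(x: int) -> int:
--         if border <= x < border + 7:
--             return 0
--         if matrix_size - border - 7 <= x < matrix_size - border:
--             return 1
--         return 2
--     return band_code(row) + band_code(col) <= 1
-- ===== Notes on version B (the rewrite author's own statement) =====
-- stated objective: alternative
-- what changed: Replaced the enumeration of the three finder-corner squares by a per-axis classification: each coordinate is mapped to a band code (0 near band, 1 far band, 2 neither) and the cell is accepted iff the two codes sum to at most 1.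
import Mathlib
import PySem

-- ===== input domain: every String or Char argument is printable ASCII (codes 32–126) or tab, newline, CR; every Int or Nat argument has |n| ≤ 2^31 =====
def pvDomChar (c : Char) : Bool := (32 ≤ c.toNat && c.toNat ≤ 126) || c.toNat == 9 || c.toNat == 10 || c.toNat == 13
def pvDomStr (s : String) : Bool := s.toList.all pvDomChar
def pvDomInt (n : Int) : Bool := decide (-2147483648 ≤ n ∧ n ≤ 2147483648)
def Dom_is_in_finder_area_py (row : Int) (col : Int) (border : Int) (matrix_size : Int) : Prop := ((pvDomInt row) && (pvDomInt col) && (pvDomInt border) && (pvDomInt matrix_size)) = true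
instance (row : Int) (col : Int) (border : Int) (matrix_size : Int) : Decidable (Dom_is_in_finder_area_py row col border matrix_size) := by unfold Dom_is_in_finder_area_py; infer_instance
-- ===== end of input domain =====

-- ===== PORT A =====
-- Port of A: scan the list of three finder origins.
def is_in_finder_area_py (row : Int) (col : Int) (border : Int) (matrix_size : Int) : Bool :=
  let finder_size : Int := 7
  let finder_origins : List (Int × Int) :=
    [(border, border),
     (matrix_size - border - finder_size, border),
     (border, matrix_size - border - finder_size)]
  finder_origins.any (fun p =>
    decide (p.2 ≤ row ∧ row < p.2 + finder_size ∧ p.1 ≤ col ∧ col < p.1 + finder_size))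

-- ===== PORT B =====
-- B's helper band_code: 0 = near band, 1 = far band (if not near), 2 = neither.
def pvBandCode (border : Int) (matrix_size : Int) (x : Int) : Int :=
  if border ≤ x ∧ x < border + 7 then 0
  else if matrix_size - border - 7 ≤ x ∧ x < matrix_size - border then 1
  else 2

-- Port of B: per-axis band codes; accept iff the codes sum to at most 1.
def is_in_finder_area_py_alt (row : Int) (col : Int) (border : Int) (matrix_size : Int) : Bool :=
  decide (pvBandCode border matrix_size row + pvBandCode border matrix_size col ≤ 1)

-- ===== PRECONDITION & SPEC =====
def Spec_is_in_finder_area_py (row : Int) (col : Int) (border : Int) (matrix_size : Int) (out : Bool) : Prop := out = is_in_finder_area_py_alt row col border matrix_size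
instance (row : Int) (col : Int) (border : Int) (matrix_size : Int) (out : Bool) : Decidable (Spec_is_in_finder_area_py row col border matrix_size out) := by unfold Spec_is_in_finder_area_py; infer_instance

-- ===== CLAIM (what is proved, stated in full; the proofs are below) =====
def Claim_equal_is_in_finder_area_py : Prop := ∀ (row : Int) (col : Int) (border : Int) (matrix_size : Int), Dom_is_in_finder_area_py row col border matrix_size → Spec_is_in_finder_area_py row col border matrix_size (is_in_finder_area_py row col border matrix_size)

-- ===== LEMMAS AND PROOFS =====

-- ===== VERDICT (by name: the statement is the Claim_ definition above) =====
theorem is_in_finder_area_py_spec : Claim_equal_is_in_finder_area_py := by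
  intro row col border matrix_size _
  unfold Spec_is_in_finder_area_py is_in_finder_area_py is_in_finder_area_py_alt pvBandCode
  simp only [List.any_cons, List.any_nil, Bool.or_false]
  rw [Bool.eq_iff_iff]
  simp only [Bool.or_eq_true, decide_eq_true_eq]
  split_ifs <;> (try simp only [decide_eq_true_eq]) <;> omega
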